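-- pv_equiv track=rewrite | github.com/xiaoxue11/hank_practice | Search/05_triplets.py | triplets3
-- ===== SOURCE A (Python) =====
-- def triplets3(a, b, c):
--     count = 0
--     new_a = sorted(set(a))
--     new_b = sorted(set(b))
--     new_c = sorted(set(c))
--     for b_v in new_b:
--         a_count = binary_search(new_a, b_v) + 1
--         c_count = binary_search(new_c, b_v) + 1
--         count += a_count * c_count
--     return count
--
-- def binary_search(li, value):
--     if li is None:
--         return
--     index = -1
--     low = 0
--     high = len(li) - 1
--     while low <= high:
--         mid = low + (high - low) // 2
--         if li[mid] <= value:
--             index = mid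
--             low = mid + 1
--         else:
--             high = mid - 1
--     return index
-- ===== SOURCE B (Python) =====
-- def triplets3(a, b, c):
--     new_a = sorted(set(a))
--     new_b = sorted(set(b))
--     new_c = sorted(set(c))
--     i = j = 0
--     count = 0
--     for v in new_b:
--         while i < len(new_a) and new_a[i] <= v:
--             i += 1
--         while j < len(new_c) and new_c[j] <= v:
--             j += 1
--         count += i * j
--     return count
-- ===== Notes on version B (the rewrite author's own statement) =====
-- stated objective: faster
-- what changed: Replaced the per-b-value binary searches with a single merge-style pass: two monotone indices into the sorted a- and c-lists advance once across all b values, so each element is visited at most once instead of O(log n) searches per b.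
import Mathlib
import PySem

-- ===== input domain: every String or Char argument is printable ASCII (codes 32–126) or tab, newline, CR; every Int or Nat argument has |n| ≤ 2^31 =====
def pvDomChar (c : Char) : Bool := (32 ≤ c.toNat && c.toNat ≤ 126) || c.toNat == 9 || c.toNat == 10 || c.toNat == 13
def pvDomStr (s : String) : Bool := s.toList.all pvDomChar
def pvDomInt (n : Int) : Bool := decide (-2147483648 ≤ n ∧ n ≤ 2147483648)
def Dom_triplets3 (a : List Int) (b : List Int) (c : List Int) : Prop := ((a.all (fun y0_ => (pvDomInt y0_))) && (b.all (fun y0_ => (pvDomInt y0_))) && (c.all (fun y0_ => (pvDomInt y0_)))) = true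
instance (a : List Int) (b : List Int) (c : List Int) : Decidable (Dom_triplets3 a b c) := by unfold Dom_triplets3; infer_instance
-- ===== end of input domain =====

-- B replaces A's per-b-value binary searches by one merge-style pass with two monotone indices (objective: faster counting phase).

-- ===== PORT A =====
-- the while loop of binary_search; the 'li is None' branch is unreachable here (always called on a list).
-- li[mid] is ported with pyGetD (default 0): in every call mid is in range (0 ≤ low ≤ mid ≤ high < len), exact there.
-- fuel = one more than the interval length: the interval shrinks every iteration, so it is never exhausted
def bsLoop (fuel : Nat) (li : List Int) (value index low high : Int) : Int :=
  match fuel with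
  | 0 => index
  | fuel + 1 =>
    if low ≤ high then
      let mid := low + PySem.Int.floordiv (high - low) 2
      if PySem.List.pyGetD li mid 0 ≤ value then bsLoop fuel li value mid (mid + 1) high
      else bsLoop fuel li value index low (mid - 1)
    else index

def binary_search (li : List Int) (value : Int) : Int :=
  bsLoop (li.length + 1) li value (-1) 0 ((li.length : Int) - 1)

def triplets3 (a : List Int) (b : List Int) (c : List Int) : Int :=
  let new_a := PySem.List.sorted (PySem.Set.ofList a) (fun x => x) false
  let new_b := PySem.List.sorted (PySem.Set.ofList b) (fun x => x) false
  let new_c := PySem.List.sorted (PySem.Set.ofList c) (fun x => x) false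
  new_b.foldl (fun count b_v =>
    count + (binary_search new_a b_v + 1) * (binary_search new_c b_v + 1)) 0

-- ===== PORT B =====
-- the inner 'while i < len(li) and li[i] <= v: i += 1' loop
-- fuel = the number of elements left to scan: never exhausted before the loop stops
def advanceFuel (fuel : Nat) (li : List Int) (v : Int) (i : Nat) : Nat :=
  match fuel with
  | 0 => i
  | fuel + 1 =>
    if h : i < li.length then
      if li[i] ≤ v then advanceFuel fuel li v (i + 1) else i
    else i

def advance (li : List Int) (v : Int) (i : Nat) : Nat :=
  advanceFuel (li.length - i) li v i

def triplets3_alt (a : List Int) (b : List Int) (c : List Int) : Int :=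
  let new_a := PySem.List.sorted (PySem.Set.ofList a) (fun x => x) false
  let new_b := PySem.List.sorted (PySem.Set.ofList b) (fun x => x) false
  let new_c := PySem.List.sorted (PySem.Set.ofList c) (fun x => x) false
  let st := new_b.foldl (fun (st : Nat × Nat × Int) v =>
    let i := advance new_a v st.1
    let j := advance new_c v st.2.1
    (i, j, st.2.2 + (i : Int) * (j : Int))) (0, 0, 0)
  st.2.2

-- ===== PRECONDITION & SPEC =====
def Spec_triplets3 (a : List Int) (b : List Int) (c : List Int) (out : Int) : Prop := out = triplets3_alt a b c
instance (a : List Int) (b : List Int) (c : List Int) (out : Int) : Decidable (Spec_triplets3 a b c out) := by unfold Spec_triplets3; infer_instance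

-- ===== CLAIM (what is proved, stated in full; the proofs are below) =====
def Claim_equal_triplets3 : Prop := ∀ (a : List Int) (b : List Int) (c : List Int), Dom_triplets3 a b c → Spec_triplets3 a b c (triplets3 a b c)

-- ===== LEMMAS AND PROOFS =====

-- number of elements ≤ v in a row in front: the common reference both programs compute
def cntLE (li : List Int) (v : Int) : Nat := (li.takeWhile (fun x => decide (x ≤ v))).length

lemma tw_len (p : Int → Bool) : ∀ (li : List Int) (i : Nat), i ≤ li.length →
    (∀ k (hk : k < li.length), k < i → p li[k] = true) →
    (∀ h : i < li.length, p li[i] = false) →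
    (li.takeWhile p).length = i := by
  intro li
  induction li with
  | nil => intro i hi _ _; simp at hi ⊢; omega
  | cons x t ih =>
    intro i hi h1 h2
    cases i with
    | zero =>
      have hx : p x = false := h2 (by simp)
      simp [List.takeWhile, hx]
    | succ m =>
      have hx : p x = true := h1 0 (by simp) (Nat.succ_pos m)
      simp only [List.takeWhile, hx, List.length_cons]
      have := ih m (by simpa using hi)
        (fun k hk hkm => h1 (k + 1) (by simpa using hk) (by omega))
        (fun h => h2 (by simpa using h))
      omega

lemma tw_get (p : Int → Bool) : ∀ (li : List Int) (k : Nat) (hk : k < li.length),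
    k < (li.takeWhile p).length → p li[k] = true := by
  intro li
  induction li with
  | nil => simp
  | cons x t ih =>
    intro k hk hkt
    by_cases hx : p x = true
    · cases k with
      | zero => simpa using hx
      | succ m =>
        simp only [List.takeWhile, hx, List.length_cons] at hkt
        exact ih m (by simpa using hk) (by omega)
    · have hx' : p x = false := by simpa using hx
      simp [List.takeWhile, hx'] at hkt

lemma cntLE_le_length (li : List Int) (v : Int) : cntLE li v ≤ li.length := by
  unfold cntLE; exact (List.takeWhile_prefix _).length_le

lemma advanceFuel_eq (li : List Int) (v : Int) : ∀ (fuel : Nat) (i : Nat),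
    i ≤ li.length → li.length - i ≤ fuel →
    (∀ k (hk : k < li.length), k < i → li[k] ≤ v) →
    advanceFuel fuel li v i = cntLE li v := by
  intro fuel
  induction fuel with
  | zero =>
    intro i hle hf hpre
    have hi : i = li.length := by omega
    subst hi
    exact (tw_len _ li li.length (le_refl _)
      (fun k hk hki => by simpa using hpre k hk hki) (fun hh => absurd hh (by omega))).symm
  | succ f ih =>
    intro i hle hf hpre
    unfold advanceFuel
    by_cases h : i < li.length
    · simp only [h, dif_pos]
      by_cases hv : li[i] ≤ v
      · simp only [hv, if_pos]
        exact ih (i + 1) h (by omega) (by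
          intro k hk hki
          rcases Nat.lt_succ_iff_lt_or_eq.mp hki with hlt | heq
          · exact hpre k hk hlt
          · subst heq; exact hv)
      · simp only [hv, if_neg, not_false_iff]
        refine (tw_len _ li i hle (fun k hk hki => by simpa using hpre k hk hki)
          (fun hh => by simpa using hv)).symm
    · simp only [h, dif_neg, not_false_iff]
      have hi : i = li.length := Nat.le_antisymm hle (Nat.le_of_not_lt h)
      subst hi
      exact (tw_len _ li li.length (le_refl _)
        (fun k hk hki => by simpa using hpre k hk hki) (fun hh => absurd hh (by omega))).symm

lemma advance_eq (li : List Int) (v : Int) (i : Nat)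
    (hle : i ≤ li.length)
    (hpre : ∀ k (hk : k < li.length), k < i → li[k] ≤ v) :
    advance li v i = cntLE li v :=
  advanceFuel_eq li v (li.length - i) i hle (le_refl _) hpre

lemma bsLoop_eq (li : List Int) (v : Int)
    (hmono : ∀ p q (hp : p ≤ q) (hq : q < li.length), li[p]'(by omega) ≤ li[q]) :
    ∀ (fuel : Nat) (index low high : Int),
    (high - low + 1).toNat < fuel →
    0 ≤ low → high ≤ (li.length : Int) - 1 → low ≤ high + 1 →
    index = low - 1 →
    (∀ k (hk : k < li.length), (k : Int) < low → li[k] ≤ v) →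
    (∀ k (hk : k < li.length), high < (k : Int) → v < li[k]) →
    bsLoop fuel li v index low high = (cntLE li v : Int) - 1 := by
  intro fuel
  induction fuel with
  | zero => intro index low high hf; omega
  | succ f ih =>
    intro index low high hf hlow hhigh hlh hidx h1 h2
    unfold bsLoop
    by_cases h : low ≤ high
    · simp only [h, if_pos]
      have hfd : PySem.Int.floordiv (high - low) 2 = (high - low) / 2 :=
        PySem.Int.floordiv_eq_ediv_of_pos (by omega)
      set mid := low + PySem.Int.floordiv (high - low) 2 with hmid
      have hmb : low ≤ mid ∧ mid ≤ high := by rw [hmid, hfd]; omega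
      have hmlen : mid.toNat < li.length := by omega
      rw [PySem.List.pyGetD_eq_getElem li 0 (by omega) (by omega)]
      by_cases hv : li[mid.toNat] ≤ v
      · simp only [hv, if_pos]
        refine ih mid (mid + 1) high (by omega) (by omega) hhigh (by omega) (by ring_nf)
          (fun k hk hklow => ?_) h2
        have : li[k] ≤ li[mid.toNat] := hmono k mid.toNat (by omega) hmlen
        omega
      · simp only [hv, if_neg, not_false_iff]
        refine ih index low (mid - 1) (by omega) hlow (by omega) (by omega) hidx h1
          (fun k hk hkhigh => ?_)
        have : li[mid.toNat] ≤ li[k] := hmono mid.toNat k (by omega) hk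
        omega
    · simp only [h, if_neg, not_false_iff]
      have hle : low = high + 1 := by omega
      have hcnt : cntLE li v = low.toNat := by
        refine tw_len _ li low.toNat (by omega) (fun k hk hki => by
            simp only [decide_eq_true_eq]; exact h1 k hk (by omega))
          (fun hh => by
            simp only [decide_eq_false_iff_not, not_le]
            exact h2 low.toNat hh (by omega))
      rw [hcnt]; omega

lemma binary_search_eq (li : List Int) (v : Int)
    (hmono : ∀ p q (hp : p ≤ q) (hq : q < li.length), li[p]'(by omega) ≤ li[q]) :
    binary_search li v = (cntLE li v : Int) - 1 := by
  unfold binary_search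
  exact bsLoop_eq li v hmono (li.length + 1) (-1) 0 ((li.length : Int) - 1) (by omega)
    (le_refl 0) (by omega) (by omega) (by norm_num)
    (fun k hk hkl => absurd hkl (by omega)) (fun k hk hkh => absurd hkh (by omega))

lemma fold_eq (na nc : List Int)
    (hma : ∀ p q (hp : p ≤ q) (hq : q < na.length), na[p]'(by omega) ≤ na[q])
    (hmc : ∀ p q (hp : p ≤ q) (hq : q < nc.length), nc[p]'(by omega) ≤ nc[q]) :
    ∀ (nb : List Int) (i j : Nat) (cnt : Int),
    nb.Pairwise (· ≤ ·) →
    i ≤ na.length → j ≤ nc.length →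
    (∀ v ∈ nb, ∀ k (hk : k < na.length), k < i → na[k] ≤ v) →
    (∀ v ∈ nb, ∀ k (hk : k < nc.length), k < j → nc[k] ≤ v) →
    nb.foldl (fun count b_v =>
      count + (binary_search na b_v + 1) * (binary_search nc b_v + 1)) cnt
    = (nb.foldl (fun (st : Nat × Nat × Int) v =>
        let i := advance na v st.1
        let j := advance nc v st.2.1
        (i, j, st.2.2 + (i : Int) * (j : Int))) (i, j, cnt)).2.2 := by
  intro nb
  induction nb with
  | nil => intro i j cnt _ _ _ _ _; rfl
  | cons v t ih =>
    intro i j cnt hp hi hj hia hja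
    simp only [List.foldl_cons]
    have hav : advance na v i = cntLE na v :=
      advance_eq na v i hi (hia v (by simp))
    have hcv : advance nc v j = cntLE nc v :=
      advance_eq nc v j hj (hja v (by simp))
    have hbsa : binary_search na v = (cntLE na v : Int) - 1 := binary_search_eq na v hma
    have hbsc : binary_search nc v = (cntLE nc v : Int) - 1 := binary_search_eq nc v hmc
    have hvt : ∀ v' ∈ t, v ≤ v' := (List.pairwise_cons.mp hp).1
    have step := ih (advance na v i) (advance nc v j)
      (cnt + (binary_search na v + 1) * (binary_search nc v + 1))
      (List.pairwise_cons.mp hp).2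
      (by rw [hav]; exact cntLE_le_length na v)
      (by rw [hcv]; exact cntLE_le_length nc v)
      (fun v' hv' k hk hki => by
        rw [hav] at hki
        have h1 : na[k] ≤ v := by
          have := tw_get (fun x => decide (x ≤ v)) na k hk hki
          simpa using this
        exact le_trans h1 (hvt v' hv'))
      (fun v' hv' k hk hkj => by
        rw [hcv] at hkj
        have h1 : nc[k] ≤ v := by
          have := tw_get (fun x => decide (x ≤ v)) nc k hk hkj
          simpa using this
        exact le_trans h1 (hvt v' hv'))
    rw [step, hav, hcv, hbsa, hbsc]
    norm_num

-- ===== VERDICT (by name: the statement is the Claim_ definition above) =====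
theorem triplets3_spec : Claim_equal_triplets3 := by
  intro a b c _
  unfold Spec_triplets3 triplets3 triplets3_alt
  have key := fun (x : List Int) =>
    PySem.List.sorted_ofList_pairwise_lt (xs := x)
  have mono : ∀ (x : List Int) p q (hp : p ≤ q)
      (hq : q < (PySem.List.sorted (PySem.Set.ofList x) (fun y => y) false).length),
      (PySem.List.sorted (PySem.Set.ofList x) (fun y => y) false)[p]'(by omega) ≤
      (PySem.List.sorted (PySem.Set.ofList x) (fun y => y) false)[q] := by
    intro x p q hp hq
    rcases Nat.lt_or_ge p q with hlt | hge
    · exact le_of_lt ((List.pairwise_iff_getElem.mp (key x)) p q (by omega) hq hlt)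
    · have : p = q := by omega
      subst this; exact le_refl _
  exact fold_eq _ _ (mono a) (mono c) _ 0 0 0
    ((key b).imp (fun h => le_of_lt h))
    (Nat.zero_le _) (Nat.zero_le _)
    (fun v hv k hk hki => absurd hki (by omega))
    (fun v hv k hk hkj => absurd hkj (by omega))
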